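-- pv_equiv track=rewrite | github.com/pandas-dev/pandas | venv/Lib/site-packages/numexpr/necompiler.py | sigPerms
-- ===== SOURCE A (Python) =====
-- def sigPerms(s):
--     """Generate all possible signatures derived by upcasting the given
--     signature.
--     """
--     codes = 'bilfdc'
--     if not s:
--         yield ''
--     elif s[0] in codes:
--         start = codes.index(s[0])
--         for x in codes[start:]:
--             for y in sigPerms(s[1:]):
--                 yield x + y
--     elif s[0] == 's':  # numbers shall not be cast to strings
--         for y in sigPerms(s[1:]):
--             yield 's' + y
--     else:
--         yield s
-- ===== SOURCE B (Python) =====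
-- def sigPerms(s):
--     """Generate all possible signatures derived by upcasting the given
--     signature."""
--     codes = 'bilfdc'
--     opts = []
--     suffix = ''
--     for i, ch in enumerate(s):
--         if ch in codes:
--             opts.append(codes[codes.index(ch):])
--         elif ch == 's':
--             opts.append('s')
--         else:
--             suffix = s[i:]
--             break
--     combos = ['']
--     for opt in opts:
--         combos = [p + c for p in combos for c in opt]
--     for p in combos:
--         yield p + suffix
-- ===== Notes on version B (the rewrite author's own statement) =====
-- stated objective: alternative
-- what changed: Replaces A's nested recursive generator (recursing per character with a loop over upcast codes around each recursive call) by a single forward scan that collects per-position option lists plus a trailing suffix, followed by one iterative cross-product build over those lists.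
import Mathlib
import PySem

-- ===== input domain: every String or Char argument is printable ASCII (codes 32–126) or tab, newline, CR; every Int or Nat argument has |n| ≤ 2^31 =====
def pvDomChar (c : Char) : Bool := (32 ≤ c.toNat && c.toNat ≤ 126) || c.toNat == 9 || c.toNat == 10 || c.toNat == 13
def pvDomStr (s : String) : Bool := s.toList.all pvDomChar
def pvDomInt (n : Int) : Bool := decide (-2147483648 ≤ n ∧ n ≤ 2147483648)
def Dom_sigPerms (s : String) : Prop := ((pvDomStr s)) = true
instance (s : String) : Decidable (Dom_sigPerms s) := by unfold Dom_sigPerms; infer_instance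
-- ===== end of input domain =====

-- B replaces A's nested recursive generator by a single scan that collects the per-position
-- option lists and a trailing suffix, followed by one iterative product build ("alternative").

-- ===== PORT A =====
-- codes = 'bilfdc' (ASCII; represented as its character list, exact on this domain)
def pvCodes : List Char := ['b', 'i', 'l', 'f', 'd', 'c']

-- literal transliteration of A on the character list of s; each `yield` appends to the result list
def sigPermsA : List Char → List (List Char)
  | [] => [[]]
  | c :: rest =>
    if c ∈ pvCodes then
      -- start = codes.index(s[0]); for x in codes[start:]: for y in sigPerms(s[1:]): yield x + y
      (pvCodes.drop (pvCodes.idxOf c)).flatMap (fun x => (sigPermsA rest).map (fun y => x :: y))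
    else if c = 's' then
      (sigPermsA rest).map (fun y => 's' :: y)
    else
      [c :: rest]

def sigPerms (s : String) : List String := (sigPermsA s.toList).map String.ofList

-- ===== PORT B =====
-- the scan loop of Source B: builds (opts, suffix); stops at the first char outside 'bilfdcs'
def sigPermsScan : List Char → (List (List Char)) × List Char
  | [] => ([], [])
  | c :: rest =>
    if c ∈ pvCodes then
      let r := sigPermsScan rest
      ((pvCodes.drop (pvCodes.idxOf c)) :: r.1, r.2)
    else if c = 's' then
      let r := sigPermsScan rest
      (['s'] :: r.1, r.2)
    else
      ([], c :: rest)

-- combos = ['']; for opt in opts: combos = [p + c for p in combos for c in opt]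
def sigPermsCombos (opts : List (List Char)) : List (List Char) :=
  opts.foldl (fun combos opt => combos.flatMap (fun p => opt.map (fun ch => p ++ [ch]))) [[]]

def sigPerms_alt (s : String) : List String :=
  let r := sigPermsScan s.toList
  ((sigPermsCombos r.1).map (fun p => p ++ r.2)).map String.ofList

-- ===== PRECONDITION & SPEC =====
def Spec_sigPerms (s : String) (out : List String) : Prop := out = sigPerms_alt s
instance (s : String) (out : List String) : Decidable (Spec_sigPerms s out) := by unfold Spec_sigPerms; infer_instance

-- ===== CLAIM (what is proved, stated in full; the proofs are below) =====
def Claim_equal_sigPerms : Prop := ∀ (s : String), Dom_sigPerms s → Spec_sigPerms s (sigPerms s)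

-- ===== LEMMAS AND PROOFS =====

-- right-nested product of the option lists (proof-side normal form of the combo build)
def prodR : List (List Char) → List (List Char)
  | [] => [[]]
  | o :: os => o.flatMap (fun ch => (prodR os).map (fun q => ch :: q))

theorem combos_foldl (opts : List (List Char)) :
    ∀ combos : List (List Char),
      opts.foldl (fun combos opt => combos.flatMap (fun p => opt.map (fun ch => p ++ [ch]))) combos
        = combos.flatMap (fun p => (prodR opts).map (fun q => p ++ q)) := by
  induction opts with
  | nil => intro combos; simp [prodR]
  | cons o os ih =>
    intro combos
    simp only [List.foldl_cons, ih, prodR]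
    simp [List.flatMap_assoc, List.flatMap_map, List.map_flatMap, List.map_map,
      Function.comp_def, List.append_assoc]

theorem sigPermsCombos_eq (opts : List (List Char)) : sigPermsCombos opts = prodR opts := by
  simp [sigPermsCombos, combos_foldl]

theorem sigPermsA_eq (l : List Char) :
    sigPermsA l = (prodR (sigPermsScan l).1).map (fun q => q ++ (sigPermsScan l).2) := by
  induction l with
  | nil => simp [sigPermsA, sigPermsScan, prodR]
  | cons c rest ih =>
    by_cases hc : c ∈ pvCodes
    · simp only [sigPermsA, sigPermsScan, if_pos hc, ih, prodR]
      simp [List.map_flatMap, List.map_map, Function.comp_def]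
    · by_cases hs : c = 's'
      · simp only [sigPermsA, sigPermsScan, if_neg hc, if_pos hs, ih, prodR]
        simp [List.map_flatMap, List.map_map, Function.comp_def]
      · simp [sigPermsA, sigPermsScan, if_neg hc, if_neg hs, prodR]

-- ===== VERDICT (by name: the statement is the Claim_ definition above) =====
theorem sigPerms_spec : Claim_equal_sigPerms := by
  intro s _
  simp only [Spec_sigPerms, sigPerms, sigPerms_alt, sigPermsA_eq, sigPermsCombos_eq]
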